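-- pv_equiv track=rewrite | github.com/PeteSong/demos | python-demos/leetcode/lc2248.py | valid_arg
-- ===== SOURCE A (Python) =====
-- def valid_arg(nums: list[list[int]]) -> bool:
--     if nums is None or not isinstance(nums, list) or (l1 := len(nums)) == 0 or l1 > 1000:
--         return False
--     if any(not isinstance(numa, list) for numa in nums):
--         return False
--     lens = list(map(len, nums))
--     lens_set = list(map(len, (map(set, nums))))
--     if lens != lens_set:
--         return False
--     total_len = sum(lens)
--     if total_len > 1000:
--         return False
--     if any((not isinstance(n, int)) or (n < 1) or (n > 1000) for numa in nums for n in numa):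
--         return False
--     return True
-- ===== SOURCE B (Python) =====
-- def valid_arg(nums: list[list[int]]) -> bool:
--     if nums is None or not isinstance(nums, list):
--         return False
--     n = len(nums)
--     if n == 0 or n > 1000:
--         return False
--     total = 0
--     for sub in nums:
--         if not isinstance(sub, list):
--             return False
--         if len(sub) != len(set(sub)):
--             return False
--         total += len(sub)
--         if total > 1000:
--             return False
--         for x in sub:
--             if not isinstance(x, int) or x < 1 or x > 1000:
--                 return False
--     return True
-- ===== Notes on version B (the rewrite author's own statement) =====
-- stated objective: simpler
-- what changed: Replaced A's five separate passes (list-of-lens, list-of-set-lens, list comparison, sum, flat any-scan) by one loop over the sublists that checks uniqueness, a running length total, and the element range together with early exit; measurably faster by a constant factor (one traversal, early exit).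
import Mathlib
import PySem

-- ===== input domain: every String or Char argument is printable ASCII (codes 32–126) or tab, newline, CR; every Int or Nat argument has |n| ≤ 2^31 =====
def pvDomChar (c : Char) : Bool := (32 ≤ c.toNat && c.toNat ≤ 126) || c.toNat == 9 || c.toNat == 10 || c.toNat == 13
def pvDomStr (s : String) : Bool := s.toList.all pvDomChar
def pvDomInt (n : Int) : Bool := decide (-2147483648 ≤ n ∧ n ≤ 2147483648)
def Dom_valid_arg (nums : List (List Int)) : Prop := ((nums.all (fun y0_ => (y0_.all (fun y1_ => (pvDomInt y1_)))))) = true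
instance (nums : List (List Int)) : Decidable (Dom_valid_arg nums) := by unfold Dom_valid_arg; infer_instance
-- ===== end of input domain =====

-- B merges A's five separate scans (map len, map set-len, list compare, sum, flat any) into one
-- loop with a running total and early exit; same value everywhere (objective: simpler).

-- ===== PORT A =====
-- the `nums is None / isinstance` guards are vacuous under the type List (List Int)
def valid_arg (nums : List (List Int)) : Bool :=
  if nums.length == 0 || nums.length > 1000 then false
  else if nums.any (fun _ => false) then false  -- any(not isinstance(numa, list) ...): always False here
  else
    let lens : List Int := nums.map (fun a => (a.length : Int))
    let lens_set : List Int := nums.map (fun a => ((PySem.Set.ofList a).length : Int))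
    if lens ≠ lens_set then false
    else
      let total_len := lens.foldl (· + ·) 0
      if total_len > 1000 then false
      else if nums.any (fun numa => numa.any (fun n => n < 1 || n > 1000)) then false
      else true

-- ===== PORT B =====
def validGo : List (List Int) → Int → Bool
  | [], _ => true
  | sub :: rest, total =>
    if sub.length ≠ (PySem.Set.ofList sub).length then false
    else
      let total' := total + (sub.length : Int)
      if total' > 1000 then false
      else if sub.any (fun x => x < 1 || x > 1000) then false
      else validGo rest total'

def valid_arg_alt (nums : List (List Int)) : Bool :=
  if nums.length == 0 || nums.length > 1000 then false
  else validGo nums 0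

-- ===== PRECONDITION & SPEC =====
def Spec_valid_arg (nums : List (List Int)) (out : Bool) : Prop := out = valid_arg_alt nums
instance (nums : List (List Int)) (out : Bool) : Decidable (Spec_valid_arg nums out) := by unfold Spec_valid_arg; infer_instance

-- ===== CLAIM (what is proved, stated in full; the proofs are below) =====
def Claim_equal_valid_arg : Prop := ∀ (nums : List (List Int)), Dom_valid_arg nums → Spec_valid_arg nums (valid_arg nums)

-- ===== LEMMAS AND PROOFS =====

def sumLens (l : List (List Int)) : Int := (l.map (fun a => (a.length : Int))).sum

def Ok (l : List (List Int)) : Prop :=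
  ∀ sub ∈ l, sub.length = (PySem.Set.ofList sub).length ∧ ∀ x ∈ sub, 1 ≤ x ∧ x ≤ 1000

theorem sumLens_nonneg (l : List (List Int)) : 0 ≤ sumLens l := by
  induction l with
  | nil => simp [sumLens]
  | cons a t ih => simp only [sumLens, List.map_cons, List.sum_cons] at *; positivity

theorem sumLens_cons (sub : List Int) (rest : List (List Int)) :
    sumLens (sub :: rest) = (sub.length : Int) + sumLens rest := by
  simp [sumLens]

theorem Ok_cons (sub : List Int) (rest : List (List Int)) :
    Ok (sub :: rest) ↔
      ((sub.length = (PySem.Set.ofList sub).length ∧ ∀ x ∈ sub, 1 ≤ x ∧ x ≤ 1000) ∧ Ok rest) := by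
  constructor
  · intro h
    exact ⟨h sub List.mem_cons_self, fun s hs => h s (List.mem_cons_of_mem _ hs)⟩
  · rintro ⟨h1, h2⟩ s hs
    rcases List.mem_cons.mp hs with rfl | hs
    · exact h1
    · exact h2 s hs

theorem foldl_add (l : List Int) (t : Int) : l.foldl (· + ·) t = t + l.sum := by
  induction l generalizing t with
  | nil => simp
  | cons a l ih => simp [List.foldl_cons, List.sum_cons, ih]; ring

theorem validGo_eq_true (l : List (List Int)) (t : Int) (ht : t ≤ 1000) :
    validGo l t = true ↔ (Ok l ∧ t + sumLens l ≤ 1000) := by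
  induction l generalizing t with
  | nil =>
    simp only [validGo, sumLens, List.map_nil, List.sum_nil]
    refine iff_of_true trivial ⟨?_, by omega⟩
    intro s hs
    exact absurd hs (by simp)
  | cons sub rest ih =>
    simp only [validGo]
    rw [Ok_cons, sumLens_cons]
    split_ifs with hdis htot hr
    · simp only [false_iff]
      rintro ⟨⟨⟨h1, -⟩, -⟩, -⟩
      exact hdis h1
    · simp only [false_iff]
      rintro ⟨-, hle⟩
      have := sumLens_nonneg rest
      omega
    · simp only [false_iff]
      rintro ⟨⟨⟨-, h2⟩, -⟩, -⟩
      obtain ⟨x, hx, hxr⟩ := List.any_eq_true.mp hr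
      have := h2 x hx
      simp only [Bool.or_eq_true, decide_eq_true_eq] at hxr
      omega
    · have hall : ∀ x ∈ sub, 1 ≤ x ∧ x ≤ 1000 := by
        intro x hx
        by_contra hc
        exact hr (List.any_eq_true.mpr ⟨x, hx, by simp only [Bool.or_eq_true, decide_eq_true_eq]; omega⟩)
      rw [ih _ (by omega)]
      constructor
      · rintro ⟨hok, hle⟩
        exact ⟨⟨⟨not_not.mp hdis, hall⟩, hok⟩, by omega⟩
      · rintro ⟨⟨-, hok⟩, hle⟩
        have := sumLens_nonneg rest
        exact ⟨hok, by omega⟩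

theorem valid_arg_eq_true (nums : List (List Int))
    (hlen : ¬(nums.length == 0 || nums.length > 1000) = true) :
    valid_arg nums = true ↔ (Ok nums ∧ sumLens nums ≤ 1000) := by
  have hsum : (nums.map (fun a => (a.length : Int))).foldl (· + ·) 0 = sumLens nums := by
    rw [foldl_add]; simp [sumLens]
  simp only [valid_arg]
  rw [if_neg hlen, if_neg (by simp : ¬((nums.any fun _ => false) = true))]
  split_ifs with hmap htot hrange
  · simp only [false_iff]
    rintro ⟨hok, -⟩
    exact hmap (List.map_inj_left.mpr fun a ha => by exact_mod_cast (hok a ha).1)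
  · simp only [false_iff]
    rintro ⟨-, hle⟩
    rw [hsum] at htot
    omega
  · simp only [false_iff]
    rintro ⟨hok, -⟩
    obtain ⟨sub, hsub, x, hx, hxr⟩ := by
      simpa only [List.any_eq_true, Bool.or_eq_true, decide_eq_true_eq] using hrange
    have := (hok sub hsub).2 x hx
    omega
  · refine iff_of_true rfl ⟨?_, ?_⟩
    · intro sub hsub
      refine ⟨?_, ?_⟩
      · have := List.map_inj_left.mp (not_not.mp hmap) sub hsub
        exact_mod_cast this
      · intro x hx
        by_contra hc
        exact hrange (List.any_eq_true.mpr ⟨sub, hsub, List.any_eq_true.mpr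
          ⟨x, hx, by simp only [Bool.or_eq_true, decide_eq_true_eq]; omega⟩⟩)
    · rw [hsum] at htot
      omega

-- ===== VERDICT (by name: the statement is the Claim_ definition above) =====
theorem valid_arg_spec : Claim_equal_valid_arg := by
  intro nums _
  unfold Spec_valid_arg
  by_cases hlen : (nums.length == 0 || nums.length > 1000) = true
  · simp [valid_arg, valid_arg_alt, hlen]
  · rw [Bool.eq_iff_iff, valid_arg_eq_true nums hlen]
    unfold valid_arg_alt
    rw [if_neg hlen, validGo_eq_true nums 0 (by omega)]
    simp
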